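-- pv_equiv track=rewrite | github.com/blueyi/vcf_fix | vcf_fix.py | unfold_lines
-- ===== SOURCE A (Python) =====
-- from typing import List, Dict, Set, Tuple, Optional
--
-- def _strip_qp_soft_break(prev: str) -> str:
--     """去掉上一行末尾的 QP 软换行符（单个 =），合并续行时用。"""
--     s = prev.rstrip("\r\n")
--     if s.endswith("="):
--         return s[:-1]
--     return s
--
-- def unfold_lines(lines: List[str]) -> List[str]:
--     """VCF 续行：以空格/制表符开头的行与上一行合并；以 = 开头的行视为 QP 续行也合并。仅对以 = 开头的续行合并时去掉上一行末尾的 QP 软换行符 =。"""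
--     result = []
--     for line in lines:
--         if result and (line.startswith(" ") or line.startswith("\t")):
--             result[-1] = result[-1].rstrip("\r\n") + line[1:]
--         elif result and line.startswith("=") and ":" not in line.strip():
--             prev = _strip_qp_soft_break(result[-1])
--             result[-1] = prev + line.strip()
--         else:
--             result.append(line)
--     return result
-- ===== SOURCE B (Python) =====
-- from typing import List
--
-- def _strip_qp_soft_break(prev: str) -> str:
--     s = prev.rstrip("\r\n")
--     return s[:-1] if s.endswith("=") else s
--
-- def _is_cont(line: str) -> bool:
--     return line.startswith(" ") or line.startswith("\t") or \
--         (line.startswith("=") and ":" not in line.strip())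
--
-- def _merge(base: str, line: str) -> str:
--     if line.startswith(" ") or line.startswith("\t"):
--         return base.rstrip("\r\n") + line[1:]
--     return _strip_qp_soft_break(base) + line.strip()
--
-- def unfold_lines(lines: List[str]) -> List[str]:
--     """Two staged passes: first compute the start index of every logical line
--     (index 0, or any line that is not a continuation), then merge each
--     [start, next start) slice of lines independently."""
--     n = len(lines)
--     starts = [i for i in range(n) if i == 0 or not _is_cont(lines[i])]
--     out = []
--     for k in range(len(starts)):
--         a = starts[k]
--         b = starts[k + 1] if k + 1 < len(starts) else n
--         merged = lines[a]
--         for line in lines[a + 1:b]: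
--             merged = _merge(merged, line)
--         out.append(merged)
--     return out
-- ===== Notes on version B (the rewrite author's own statement) =====
-- stated objective: alternative
-- what changed: Replaces A's stateful single pass that mutates result[-1] with two staged passes: pass 1 computes the start index of every logical line as a pure per-line filter over range(n), pass 2 slices lines at those boundaries and folds each slice into one merged line independently.
import Mathlib
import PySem

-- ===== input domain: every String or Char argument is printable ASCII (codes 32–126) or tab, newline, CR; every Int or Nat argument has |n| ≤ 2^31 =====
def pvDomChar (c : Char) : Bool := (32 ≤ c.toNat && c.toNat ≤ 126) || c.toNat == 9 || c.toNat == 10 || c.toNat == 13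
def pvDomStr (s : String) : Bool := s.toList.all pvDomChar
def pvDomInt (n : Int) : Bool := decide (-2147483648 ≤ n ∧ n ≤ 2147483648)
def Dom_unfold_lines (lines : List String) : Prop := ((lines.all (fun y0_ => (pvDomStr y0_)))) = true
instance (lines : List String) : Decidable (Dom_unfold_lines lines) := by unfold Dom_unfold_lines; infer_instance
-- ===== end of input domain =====

-- B replaces A's stateful single pass (mutating result[-1]) by two staged passes:
-- compute all logical-line start indices first, then merge each slice independently.


-- ===== PORT A =====
-- s.rstrip("\r\n"): drop '\r'/'\n' characters from the right; exact hand port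
-- (PySem has no rstrip-with-chars primitive). Both Pythons call this same builtin.
def pyRstripCRLF (s : String) : String :=
  String.mk ((s.toList.reverse.dropWhile (fun c => c == '\r' || c == '\n')).reverse)

def strip_qp_soft_break (prev : String) : String :=
  let s := pyRstripCRLF prev
  if PySem.Str.endswith s "=" then PySem.Str.slice s none (some (-1)) else s

def unfoldStepA (result : List String) (line : String) : List String :=
  if !result.isEmpty && (PySem.Str.startswith line " " || PySem.Str.startswith line "\t") then
    result.dropLast ++ [pyRstripCRLF result.getLast! ++ PySem.Str.slice line (some 1) none]
  else if !result.isEmpty && PySem.Str.startswith line "=" && !PySem.Str.isIn ":" (PySem.Str.strip line) then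
    result.dropLast ++ [strip_qp_soft_break result.getLast! ++ PySem.Str.strip line]
  else
    result ++ [line]

def unfold_lines (lines : List String) : List String :=
  lines.foldl unfoldStepA []

-- ===== PORT B =====
def isCont (line : String) : Bool :=
  PySem.Str.startswith line " " || PySem.Str.startswith line "\t" ||
    (PySem.Str.startswith line "=" && !PySem.Str.isIn ":" (PySem.Str.strip line))

def mergeLine (base line : String) : String :=
  if PySem.Str.startswith line " " || PySem.Str.startswith line "\t" then
    pyRstripCRLF base ++ PySem.Str.slice line (some 1) none
  else strip_qp_soft_break base ++ PySem.Str.strip line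

-- pass 1: `[i for i in range(n) if i == 0 or not _is_cont(lines[i])]`
-- (`range(n)` over list indices → List.range; `lines[i]` has i < n, so getD is exact)
def bStarts (lines : List String) : List Nat :=
  (List.range lines.length).filter (fun i => i == 0 || !isCont (lines.getD i ""))

-- pass 2: for each start a, fold the slice `lines[a+1:b]` onto `lines[a]`
-- (indices satisfy 0 ≤ a < b ≤ n, so getD / drop-take render the Python indexing exactly)
def bOut (starts : List Nat) (lines : List String) : List String :=
  (List.range starts.length).map (fun k =>
    let a := starts.getD k 0
    let b := if k + 1 < starts.length then starts.getD (k + 1) 0 else lines.length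
    ((lines.drop (a + 1)).take (b - (a + 1))).foldl mergeLine (lines.getD a ""))

def unfold_lines_alt (lines : List String) : List String := bOut (bStarts lines) lines

-- ===== PRECONDITION & SPEC =====
def Spec_unfold_lines (lines : List String) (out : List String) : Prop := out = unfold_lines_alt lines
instance (lines : List String) (out : List String) : Decidable (Spec_unfold_lines lines out) := by unfold Spec_unfold_lines; infer_instance

-- ===== CLAIM (what is proved, stated in full; the proofs are below) =====
def Claim_equal_unfold_lines : Prop := ∀ (lines : List String), Dom_unfold_lines lines → Spec_unfold_lines lines (unfold_lines lines)

-- ===== LEMMAS AND PROOFS =====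

-- Common recursive characterisation both ports are reduced to.
def specRec : String → List String → List String
  | c, [] => [c]
  | c, l :: rest => if isCont l then specRec (mergeLine c l) rest else c :: specRec l rest

def specTop : List String → List String
  | [] => []
  | l :: rest => specRec l rest

-- ---- A-side ----
lemma getLast!_concat_str (res : List String) (c : String) : (res ++ [c]).getLast! = c := by
  rw [List.getLast!_eq_getLast?_getD]
  simp

lemma stepA_cont (res : List String) (c l : String) (h : isCont l = true) :
    unfoldStepA (res ++ [c]) l = res ++ [mergeLine c l] := by
  unfold unfoldStepA mergeLine
  have he : (res ++ [c]).isEmpty = false := by simp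
  cases h1 : (PySem.Str.startswith l " " || PySem.Str.startswith l "\t") with
  | true =>
    simp only [getLast!_concat_str, he, Bool.not_false, Bool.true_and, Bool.and_true,
      eq_self_iff_true, if_true, List.dropLast_concat]
  | false =>
    have h2 : (PySem.Str.startswith l "=" && !PySem.Str.isIn ":" (PySem.Str.strip l)) = true := by
      unfold isCont at h
      rwa [h1, Bool.false_or] at h
    simp only [getLast!_concat_str, he, Bool.not_false, Bool.true_and, Bool.and_false,
      Bool.and_assoc, h2, Bool.and_true, eq_self_iff_true, if_true, Bool.false_eq_true,
      if_false, List.dropLast_concat]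

lemma stepA_base (res : List String) (c l : String) (h : isCont l = false) :
    unfoldStepA (res ++ [c]) l = (res ++ [c]) ++ [l] := by
  rw [isCont, Bool.or_eq_false_iff] at h
  obtain ⟨h1, h2⟩ := h
  unfold unfoldStepA
  rw [h1, Bool.and_assoc, h2]
  simp only [Bool.and_false, Bool.false_eq_true, if_false]

lemma foldA_spec (rest : List String) : ∀ (res : List String) (c : String),
    List.foldl unfoldStepA (res ++ [c]) rest = res ++ specRec c rest := by
  induction rest with
  | nil => intro res c; rfl
  | cons l rest ih =>
    intro res c
    simp only [List.foldl_cons]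
    cases h : isCont l with
    | true => rw [stepA_cont res c l h, ih res (mergeLine c l)]; simp [specRec, h]
    | false =>
      rw [stepA_base res c l h, ih (res ++ [c]) l]
      simp [specRec, h]

lemma unfold_lines_eq_spec (lines : List String) : unfold_lines lines = specTop lines := by
  cases lines with
  | nil => rfl
  | cons l rest =>
    have h0 : unfoldStepA [] l = [] ++ [l] := by unfold unfoldStepA; simp
    simp only [unfold_lines, List.foldl_cons, h0]
    simpa [specTop] using foldA_spec rest [] l

-- ---- B-side ----
-- start indices within the tail (no special case i == 0)
def tStarts (xs : List String) : List Nat :=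
  (List.range xs.length).filter (fun i => !isCont (xs.getD i ""))

lemma tStarts_cons (x : String) (r : List String) :
    tStarts (x :: r) = (if isCont x then [] else [0]) ++ (tStarts r).map (· + 1) := by
  unfold tStarts
  rw [List.length_cons, List.range_succ_eq_map, List.filter_cons, List.filter_map]
  cases h : isCont x <;> simp [h, Function.comp_def]

lemma bStarts_cons (l : String) (r : List String) :
    bStarts (l :: r) = 0 :: (tStarts r).map (· + 1) := by
  unfold bStarts tStarts
  rw [List.length_cons, List.range_succ_eq_map, List.filter_cons, List.filter_map]
  simp [Function.comp_def]

lemma tStarts_append_cont (u : List String) (hu : ∀ x ∈ u, isCont x = true) (v : List String) :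
    tStarts (u ++ v) = (tStarts v).map (· + u.length) := by
  induction u with
  | nil => simp
  | cons x u ih =>
    have hx := hu x (by simp)
    rw [List.cons_append, tStarts_cons, hx, ih (fun y hy => hu y (by simp [hy]))]
    simp only [if_true, List.nil_append, List.map_map, List.length_cons]
    apply List.map_congr_left
    intro a _
    simp only [Function.comp_apply]
    omega

lemma tStarts_eq_bStarts (v : List String)
    (hv : v = [] ∨ ∃ l r, v = l :: r ∧ isCont l = false) : tStarts v = bStarts v := by
  rcases hv with h | ⟨l, r, rfl, hl⟩
  · subst h; rfl
  · rw [tStarts_cons, bStarts_cons, hl]; rfl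

-- translation invariance of pass 2
lemma bOut_shift (p v : List String) (sv : List Nat) :
    bOut (sv.map (· + p.length)) (p ++ v) = bOut sv v := by
  unfold bOut
  rw [List.length_map]
  apply List.map_congr_left
  intro k hk
  have hk' : k < sv.length := List.mem_range.mp hk
  have hget : ∀ j, j < sv.length →
      (sv.map (· + p.length)).getD j 0 = sv.getD j 0 + p.length := by
    intro j hj
    rw [List.getD_eq_getElem _ _ (by simpa using hj), List.getD_eq_getElem _ _ hj,
      List.getElem_map]
  have hb : (if k + 1 < sv.length then (sv.map (· + p.length)).getD (k + 1) 0
        else (p ++ v).length)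
      = (if k + 1 < sv.length then sv.getD (k + 1) 0 else v.length) + p.length := by
    by_cases h : k + 1 < sv.length
    · rw [if_pos h, if_pos h, hget (k + 1) h]
    · rw [if_neg h, if_neg h, List.length_append]; omega
  simp only [hget k hk', hb]
  set a := sv.getD k 0 with hadef
  set b := (if k + 1 < sv.length then sv.getD (k + 1) 0 else v.length) with hbdef
  have h1 : (p ++ v).getD (a + p.length) "" = v.getD a "" := by
    rw [List.getD_append_right p v "" (a + p.length) (by omega)]
    congr 1
    omega
  have h2 : (p ++ v).drop (a + p.length + 1) = v.drop (a + 1) := by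
    rw [List.drop_append, List.drop_eq_nil_of_le (by omega), List.nil_append]
    congr 1
    omega
  have h3 : b + p.length - (a + p.length + 1) = b - (a + 1) := by omega
  simp only [h1, h2, h3]

lemma bOut_cons (s' : List Nat) (L : List String) :
    bOut (0 :: s') L =
      ((L.drop 1).take ((if 0 < s'.length then s'.getD 0 0 else L.length) - 1)).foldl
          mergeLine (L.getD 0 "")
        :: bOut s' L := by
  unfold bOut
  rw [List.length_cons, List.range_succ_eq_map, List.map_cons, List.map_map]
  congr 1
  · simp [Nat.pos_iff_ne_zero, List.length_eq_zero_iff]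
  · apply List.map_congr_left
    intro k hk
    simp only [Function.comp_apply, List.getD_cons_succ, Nat.add_lt_add_iff_right]

lemma bAlt_cons (l : String) (rest : List String) :
    unfold_lines_alt (l :: rest) =
      ((rest.takeWhile isCont).foldl mergeLine l)
        :: unfold_lines_alt (rest.dropWhile isCont) := by
  have hrest : rest.takeWhile isCont ++ rest.dropWhile isCont = rest :=
    List.takeWhile_append_dropWhile
  have hu : ∀ x ∈ rest.takeWhile isCont, isCont x = true :=
    fun x hx => List.mem_takeWhile_imp hx
  have hv : rest.dropWhile isCont = [] ∨
      ∃ l' r', rest.dropWhile isCont = l' :: r' ∧ isCont l' = false := by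
    cases hvc : rest.dropWhile isCont with
    | nil => exact Or.inl rfl
    | cons l' r' =>
      refine Or.inr ⟨l', r', rfl, ?_⟩
      have h2 : (rest.dropWhile isCont) ≠ [] := by rw [hvc]; simp
      have h3 := List.head_dropWhile_not (p := isCont) (l := rest) h2
      have h4 : (rest.dropWhile isCont).head h2 = l' := by simp [hvc]
      rwa [h4] at h3
  have hstarts : bStarts (l :: rest) =
      0 :: (bStarts (rest.dropWhile isCont)).map
        (· + ((rest.takeWhile isCont).length + 1)) := by
    conv_lhs => rw [bStarts_cons, ← hrest]
    rw [tStarts_append_cont _ hu _, tStarts_eq_bStarts _ hv, List.map_map]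
    congr 1
  rw [unfold_lines_alt, hstarts, bOut_cons]
  congr 1
  · -- head element
    rcases hv with hvnil | ⟨l', r', hvc, _⟩
    · have hrest' : rest.takeWhile isCont = rest := by
        conv_rhs => rw [← hrest, hvnil]
        rw [List.append_nil]
      rw [hvnil, show bStarts ([] : List String) = [] from rfl, List.map_nil]
      simp only [List.length_nil, Nat.lt_irrefl, if_false, List.getD_cons_zero,
        List.drop_one, List.tail_cons, List.length_cons, Nat.add_sub_cancel,
        List.take_length, hrest']
    · rw [hvc, bStarts_cons, List.map_cons]
      simp only [List.length_cons, Nat.zero_lt_succ, if_true, List.getD_cons_zero,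
        Nat.zero_add, Nat.add_sub_cancel, List.drop_one, List.tail_cons]
      rw [← (List.prefix_iff_eq_take).mp (List.takeWhile_prefix isCont)]
  · -- tail
    have hL : l :: rest = (l :: rest.takeWhile isCont) ++ rest.dropWhile isCont := by
      conv_lhs => rw [← hrest]
      rw [List.cons_append]
    rw [hL, show ((rest.takeWhile isCont).length + 1)
        = (l :: rest.takeWhile isCont).length from rfl, bOut_shift]
    rfl

lemma specRec_chunk (u : List String) (hu : ∀ x ∈ u, isCont x = true) :
    ∀ (c : String) (v : List String), specRec c (u ++ v) = specRec (u.foldl mergeLine c) v := by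
  induction u with
  | nil => intro c v; rfl
  | cons x u ih =>
    intro c v
    have hx := hu x (by simp)
    simp only [List.cons_append, specRec, hx, if_true, List.foldl_cons]
    exact ih (fun y hy => hu y (by simp [hy])) (mergeLine c x) v

lemma specRec_split (c : String) (rest : List String) :
    specRec c rest =
      ((rest.takeWhile isCont).foldl mergeLine c) :: specTop (rest.dropWhile isCont) := by
  conv_lhs => rw [← List.takeWhile_append_dropWhile (p := isCont) (l := rest)]
  rw [specRec_chunk _ (fun x hx => List.mem_takeWhile_imp hx)]
  cases hvc : rest.dropWhile isCont with
  | nil => rfl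
  | cons l' r' =>
    have h2 : (rest.dropWhile isCont) ≠ [] := by rw [hvc]; simp
    have h3 := List.head_dropWhile_not (p := isCont) (l := rest) h2
    have h4 : (rest.dropWhile isCont).head h2 = l' := by simp [hvc]
    rw [h4] at h3
    simp [specRec, specTop, h3]

lemma bAlt_eq_spec_aux : ∀ (n : Nat) (lines : List String), lines.length ≤ n →
    unfold_lines_alt lines = specTop lines := by
  intro n
  induction n with
  | zero =>
    intro lines h
    have : lines = [] := by cases lines with | nil => rfl | cons a b => simp at h
    subst this; rfl
  | succ n ih =>
    intro lines h
    cases lines with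
    | nil => rfl
    | cons l rest =>
      rw [bAlt_cons, specTop, specRec_split]
      congr 1
      exact ih (rest.dropWhile isCont)
        (le_trans (List.length_dropWhile_le _ _) (by simpa using h))

-- ===== VERDICT (by name: the statement is the Claim_ definition above) =====
theorem unfold_lines_spec : Claim_equal_unfold_lines := by
  intro lines _
  unfold Spec_unfold_lines
  rw [unfold_lines_eq_spec, bAlt_eq_spec_aux lines.length lines le_rfl]
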